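-- pv_equiv track=rewrite | github.com/MaximeRenoux/character_network_fondation | retrieve_chars_from_loc.py | have_common_word
-- ===== SOURCE A (Python) =====
-- def have_common_word(str1, str2):
--     words1 = set(str1.split())
--     words2 = set(str2.split())
--
--     common_words = words1.intersection(words2)
--
--     long_enough = False
--     for word in common_words:
--         if len(word) >= 3:
--             long_enough = True
--     if long_enough:
--         return len(common_words) > 0
--     else:
--         return False
-- ===== SOURCE B (Python) =====
-- def have_common_word(str1, str2):
--     words2 = str2.split()
--     for w1 in str1.split():
--         if len(w1) >= 3:
--             for w2 in words2:
--                 if w1 == w2: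
--                     return True
--     return False
-- ===== Notes on version B (the rewrite author's own statement) =====
-- stated objective: alternative
-- what changed: Replaces A's build-two-hash-sets, intersect, then scan-for-a-long-word-with-a-flag strategy by a set-free nested-loop brute force: for each word of str1 of length >= 3, compare it directly against each word of str2 and return on the first match.
import Mathlib
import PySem

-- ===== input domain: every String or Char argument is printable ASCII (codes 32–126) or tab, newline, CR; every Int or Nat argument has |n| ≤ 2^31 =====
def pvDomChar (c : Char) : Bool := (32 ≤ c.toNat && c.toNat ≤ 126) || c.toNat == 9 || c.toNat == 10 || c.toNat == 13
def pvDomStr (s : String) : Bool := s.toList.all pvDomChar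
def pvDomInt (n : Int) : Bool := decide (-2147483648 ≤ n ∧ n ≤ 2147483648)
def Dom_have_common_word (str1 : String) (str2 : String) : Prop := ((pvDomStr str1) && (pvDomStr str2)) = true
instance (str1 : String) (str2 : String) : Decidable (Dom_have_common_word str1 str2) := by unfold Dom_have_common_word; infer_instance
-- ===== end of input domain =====

-- B replaces A's build-two-sets / intersect / flag-scan strategy by a set-free nested-loop
-- brute force over the two word lists, returning on the first direct match (objective: alternative).

-- ===== PORT A =====
def have_common_word (str1 : String) (str2 : String) : Bool :=
  let words1 : PySem.Set String := PySem.Set.ofList (PySem.Str.split₀ str1)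
  let words2 : PySem.Set String := PySem.Set.ofList (PySem.Str.split₀ str2)
  let common_words : PySem.Set String := PySem.Set.inter words1 words2
  -- 'for word in common_words: if len(word) >= 3: long_enough = True' — a fold over the set;
  -- the resulting flag is independent of the (unmodelled) hash iteration order
  let long_enough : Bool :=
    common_words.foldl (fun acc word => if PySem.Str.len word ≥ 3 then true else acc) false
  if long_enough then decide ((PySem.Set.len common_words : Int) > 0) else false

-- ===== PORT B =====
-- nested for-loops with early 'return True' = List.any over str1's words of an inner List.any
def have_common_word_alt (str1 : String) (str2 : String) : Bool :=
  let words2 : List String := PySem.Str.split₀ str2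
  (PySem.Str.split₀ str1).any (fun w1 =>
    if PySem.Str.len w1 ≥ 3 then words2.any (fun w2 => w1 == w2) else false)

-- ===== PRECONDITION & SPEC =====
def Spec_have_common_word (str1 : String) (str2 : String) (out : Bool) : Prop := out = have_common_word_alt str1 str2
instance (str1 : String) (str2 : String) (out : Bool) : Decidable (Spec_have_common_word str1 str2 out) := by unfold Spec_have_common_word; infer_instance

-- ===== CLAIM (what is proved, stated in full; the proofs are below) =====
def Claim_equal_have_common_word : Prop := ∀ (str1 : String) (str2 : String), Dom_have_common_word str1 str2 → Spec_have_common_word str1 str2 (have_common_word str1 str2)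

-- ===== LEMMAS AND PROOFS =====

-- the flag loop computes List.any
lemma flag_foldl_eq_any (l : List String) (acc : Bool) :
    l.foldl (fun acc word => if PySem.Str.len word ≥ 3 then true else acc) acc
      = (acc || l.any (fun w => decide (PySem.Str.len w ≥ 3))) := by
  induction l generalizing acc with
  | nil => simp
  | cons x xs ih =>
    simp only [List.foldl_cons, List.any_cons, ih]
    by_cases h : PySem.Str.len x ≥ 3 <;> simp only [h] <;> cases acc <;> simp

-- ===== VERDICT (by name: the statement is the Claim_ definition above) =====
theorem have_common_word_spec : Claim_equal_have_common_word := by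
  intro str1 str2 _
  unfold Spec_have_common_word have_common_word have_common_word_alt
  simp only [flag_foldl_eq_any, Bool.false_or]
  set s1 := PySem.Str.split₀ str1
  set s2 := PySem.Str.split₀ str2
  set common := PySem.Set.inter (PySem.Set.ofList s1) (PySem.Set.ofList s2) with hc
  by_cases h : common.any (fun w => decide (PySem.Str.len w ≥ 3)) = true
  · simp only [h, if_true]
    obtain ⟨w, hw, hpw⟩ := List.any_eq_true.mp h
    have hlen : (PySem.Set.len common : Int) > 0 := by
      simp [PySem.Set.len]
      exact List.length_pos_of_mem hw
    simp only [hlen, decide_true]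
    symm
    rw [List.any_eq_true]
    have hw' := (PySem.Set.mem_inter _ _ _).mp hw
    refine ⟨w, (PySem.Set.mem_ofList _ _).mp hw'.1, ?_⟩
    rw [if_pos (of_decide_eq_true hpw)]
    rw [List.any_eq_true]
    exact ⟨w, (PySem.Set.mem_ofList _ _).mp hw'.2, by simp⟩
  · rw [Bool.not_eq_true] at h
    simp only [h, Bool.false_eq_true, if_false]
    symm
    rw [Bool.eq_false_iff]
    intro hb
    rw [← Bool.not_eq_true] at h
    apply h
    obtain ⟨w1, hw1, hinner⟩ := List.any_eq_true.mp hb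
    by_cases hp : PySem.Str.len w1 ≥ 3
    · rw [if_pos hp] at hinner
      obtain ⟨w2, hw2, heq⟩ := List.any_eq_true.mp hinner
      have : w1 = w2 := by simpa using heq
      subst this
      rw [List.any_eq_true]
      exact ⟨w1, (PySem.Set.mem_inter _ _ _).mpr ⟨(PySem.Set.mem_ofList _ _).mpr hw1,
        (PySem.Set.mem_ofList _ _).mpr hw2⟩, by simpa using hp⟩
    · rw [if_neg hp] at hinner; exact absurd hinner (by simp)
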